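-- pv_equiv track=rewrite | github.com/move-ucsb/VASA | VASA/preprocessing/reduce_vasa_df.py | reduce_by_count
-- ===== SOURCE A (Python) =====
-- from typing import List, Tuple, Callable
-- from functools import reduce
--
-- HC_List = List[Tuple[int, int]]
--
-- County_History_List = List[List[int]]
--
-- def reduce_by_count(arr: County_History_List) -> HC_List:
--
--     # Start with pairs of 0 for each county
--     initial: HC_List = [(0, 0) for _ in range(len(arr[0]))]
--
--     reducer: Callable[[HC_List, List[int]], HC_List] = lambda acc, curr: [
--         (a[0] + (c == 1), a[1] + (c == 2)) for a, c in zip(acc, curr)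
--     ]
--
--     hh_ll: HC_List = reduce(
--         reducer,
--         arr,
--         initial
--     )
--
--     return hh_ll
-- ===== SOURCE B (Python) =====
-- def reduce_by_count(arr):
--     # Column-major re-implementation: derive the column count from arr[0]
--     # (preserving the IndexError on empty input), then count each column
--     # to completion instead of folding row by row.
--     ncols = len(arr[0])
--     out = []
--     for j in range(ncols):
--         ones = sum(1 for row in arr if row[j] == 1)
--         twos = sum(1 for row in arr if row[j] == 2)
--         out.append((ones, twos))
--     return out
-- ===== Notes on version B (the rewrite author's own statement) =====
-- stated objective: alternative
-- what changed: Replaces A's row-major reduce (threading a list of accumulator pairs through every row via zip) with a column-major pass that, for each column index, counts the 1s and 2s down all rows directly.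
-- outside the precondition, e.g. on reduce_by_count([[1, 2], [1]]): A returns [(2, 0)], B raises IndexError
import Mathlib
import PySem

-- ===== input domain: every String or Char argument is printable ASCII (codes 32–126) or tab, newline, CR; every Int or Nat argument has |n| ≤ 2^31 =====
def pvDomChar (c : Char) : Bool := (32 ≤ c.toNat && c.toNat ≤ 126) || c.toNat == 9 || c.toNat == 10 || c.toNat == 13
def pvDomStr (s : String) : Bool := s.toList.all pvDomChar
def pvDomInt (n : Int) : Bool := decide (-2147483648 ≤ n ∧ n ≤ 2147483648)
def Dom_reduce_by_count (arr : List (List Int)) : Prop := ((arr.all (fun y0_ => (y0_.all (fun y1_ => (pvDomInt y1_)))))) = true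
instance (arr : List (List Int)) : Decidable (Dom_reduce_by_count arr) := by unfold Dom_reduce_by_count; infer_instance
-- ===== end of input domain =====

-- B counts column-by-column instead of folding row-by-row; same cost, different traversal (objective: alternative).

-- ===== PORT A =====
-- initial = [(0,0) for _ in range(len(arr[0]))]; reduce(reducer, arr, initial).
-- arr[0] raises IndexError on empty arr: excluded by Pre_; headD [] is only reached outside Pre_.
def reduce_by_count (arr : List (List Int)) : List (Int × Int) :=
  let initial : List (Int × Int) := (List.range (arr.headD []).length).map (fun _ => ((0 : Int), (0 : Int)))
  arr.foldl
    (fun acc curr =>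
      (acc.zip curr).map (fun p =>
        (p.1.1 + (if p.2 = 1 then 1 else 0), p.1.2 + (if p.2 = 2 then 1 else 0))))
    initial

-- ===== PORT B =====
-- ncols = len(arr[0]); per column j, sum the indicators row[j]==1 and row[j]==2 over all rows.
-- row[j] (Python) is in range for every row inside Pre_ (rectangular), so getD's default is never used there.
def reduce_by_count_alt (arr : List (List Int)) : List (Int × Int) :=
  let ncols := (arr.headD []).length
  (List.range ncols).map (fun j =>
    ((arr.map (fun row => if row.getD j 0 = 1 then (1 : Int) else 0)).sum,
     (arr.map (fun row => if row.getD j 0 = 2 then (1 : Int) else 0)).sum))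

-- ===== PRECONDITION & SPEC =====
-- Pre_ excludes the empty list, where A raises IndexError on arr[0], and arrays with a row shorter
-- than the first row: there A's result length is an accident of zip truncation (outside the natural
-- rectangular domain) and B raises IndexError on row[j].
def Pre_reduce_by_count (arr : List (List Int)) : Prop :=
  arr ≠ [] ∧ ∀ row ∈ arr, (arr.headD []).length ≤ row.length
instance (arr : List (List Int)) : Decidable (Pre_reduce_by_count arr) := by
  unfold Pre_reduce_by_count; infer_instance
def pvWitness_reduce_by_count : List (List Int) := [[1, 2, 0], [2, 2, 1]]
def Spec_reduce_by_count (arr : List (List Int)) (out : List (Int × Int)) : Prop := out = reduce_by_count_alt arr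
instance (arr : List (List Int)) (out : List (Int × Int)) : Decidable (Spec_reduce_by_count arr out) := by unfold Spec_reduce_by_count; infer_instance

-- ===== CLAIM (what is proved, stated in full; the proofs are below) =====
def Claim_equal_reduce_by_count : Prop := ∀ (arr : List (List Int)), Dom_reduce_by_count arr → Pre_reduce_by_count arr → Spec_reduce_by_count arr (reduce_by_count arr)

-- ===== LEMMAS AND PROOFS =====

-- foldl invariant for A's reducer: folding the rows over any accumulator of matching width
-- yields, at column j, the accumulator entry plus the column's indicator sums.
theorem reduce_fold_eq (arr : List (List Int)) :
    ∀ (acc : List (Int × Int)), (∀ row ∈ arr, acc.length ≤ row.length) →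
      arr.foldl
        (fun acc curr =>
          (acc.zip curr).map (fun p =>
            (p.1.1 + (if p.2 = 1 then 1 else 0), p.1.2 + (if p.2 = 2 then 1 else 0))))
        acc
      = (List.range acc.length).map (fun j =>
          ((acc.getD j (0, 0)).1 + (arr.map (fun row => if row.getD j 0 = 1 then (1 : Int) else 0)).sum,
           (acc.getD j (0, 0)).2 + (arr.map (fun row => if row.getD j 0 = 2 then (1 : Int) else 0)).sum)) := by
  induction arr with
  | nil =>
      intro acc _
      simp only [List.foldl_nil, List.map_nil, List.sum_nil, add_zero]
      apply List.ext_getElem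
      · simp
      · intro i h1 h2
        simp only [List.getElem_map, List.getElem_range]
        rw [List.getD_eq_getElem _ _ h1]
  | cons row rest ih =>
      intro acc hlen
      have hrow : acc.length ≤ row.length := hlen row (List.mem_cons_self ..)
      set acc' := (acc.zip row).map (fun p =>
        (p.1.1 + (if p.2 = (1 : Int) then (1 : Int) else 0), p.1.2 + (if p.2 = 2 then 1 else 0))) with hacc'
      have hlen' : acc'.length = acc.length := by
        simp [hacc', Nat.min_eq_left hrow]
      have h1 : ∀ r ∈ rest, acc'.length ≤ r.length := by
        intro r hr; rw [hlen']; exact hlen r (List.mem_cons_of_mem _ hr)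
      have := ih acc' h1
      simp only [List.foldl_cons]
      rw [← hacc', this, hlen']
      apply List.map_congr_left
      intro j hj
      have hjn : j < acc.length := List.mem_range.mp hj
      have hjr : j < row.length := by omega
      have hj' : j < acc'.length := by omega
      have hget' : acc'.getD j (0, 0) =
          ((acc.getD j (0, 0)).1 + (if row.getD j 0 = 1 then 1 else 0),
           (acc.getD j (0, 0)).2 + (if row.getD j 0 = 2 then 1 else 0)) := by
        rw [List.getD_eq_getElem _ _ hj', List.getD_eq_getElem _ _ hjn, List.getD_eq_getElem _ _ hjr]
        simp [hacc', List.getElem_zip]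
      rw [hget']
      simp only [List.map_cons, List.sum_cons]
      simp [add_assoc]

-- ===== VERDICT (by name: the statement is the Claim_ definition above) =====
theorem reduce_by_count_spec : Claim_equal_reduce_by_count := by
  intro arr _ hpre
  unfold Spec_reduce_by_count reduce_by_count reduce_by_count_alt
  obtain ⟨hne, hrect⟩ := hpre
  set n := (arr.headD []).length with hn
  have hinit : ((List.range n).map (fun _ => ((0 : Int), (0 : Int)))).length = n := by simp
  rw [reduce_fold_eq arr _ (by intro r hr; rw [hinit]; exact hrect r hr), hinit]
  apply List.map_congr_left
  intro j hj
  have hjn : j < n := List.mem_range.mp hj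
  have : ((List.range n).map (fun _ => ((0 : Int), (0 : Int)))).getD j (0, 0) = ((0 : Int), (0 : Int)) := by
    rw [List.getD_eq_getElem _ _ (by simpa using hjn)]
    simp
  rw [this]
  simp
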